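-- pv_equiv track=rewrite | github.com/ExpressedAi/Proofpacket | historical_backtest.py | _generate_market_regimes
-- ===== SOURCE A (Python) =====
-- from typing import Dict, List, Tuple, Optional
--
-- def _generate_market_regimes(n_days: int) -> List[str]:
--     """
--     Generate realistic market regimes including crises.
--
--     Simulates:
--     - 2000-2002: Dot-com crash
--     - 2008-2009: Financial crisis
--     - 2020: COVID crash
--     - 2022: Bear market
--     """
--     regimes = ["NORMAL"] * n_days
--
--     # Calculate day indices for crisis periods
--     days_per_year = 252
--
--     # 2000-2002: Dot-com (years 0-2)
--     crisis_start = 0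
--     crisis_end = int(2 * days_per_year)
--     for i in range(crisis_start, min(crisis_end, n_days)):
--         regimes[i] = "BEAR"
--
--     # 2008-2009: Financial crisis (years 8-9)
--     crisis_start = int(8 * days_per_year)
--     crisis_end = int(9 * days_per_year)
--     for i in range(crisis_start, min(crisis_end, n_days)):
--         if i < n_days:
--             regimes[i] = "CRISIS"
--
--     # 2020: COVID (year 20, Q1)
--     crisis_start = int(20 * days_per_year)
--     crisis_end = int(20 * days_per_year + 60)  # 60 days
--     for i in range(crisis_start, min(crisis_end, n_days)):
--         if i < n_days:
--             regimes[i] = "CRISIS"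
--
--     # 2022: Bear market (year 22)
--     crisis_start = int(22 * days_per_year)
--     crisis_end = int(23 * days_per_year)
--     for i in range(crisis_start, min(crisis_end, n_days)):
--         if i < n_days:
--             regimes[i] = "BEAR"
--
--     # 2009-2019: Bull market
--     bull_start = int(9.5 * days_per_year)
--     bull_end = int(20 * days_per_year)
--     for i in range(bull_start, min(bull_end, n_days)):
--         if regimes[i] == "NORMAL":
--             regimes[i] = "BULL"
--
--     return regimes
-- ===== SOURCE B (Python) =====
-- INTERVALS = [
--     (0, 504, "BEAR"),       # dot-com crash
--     (2016, 2268, "CRISIS"), # financial crisis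
--     (5040, 5100, "CRISIS"), # COVID crash
--     (5544, 5796, "BEAR"),   # 2022 bear market
--     (2394, 5040, "BULL"),   # bull market (disjoint from the crisis intervals)
-- ]
--
-- def _classify(i):
--     for start, end, label in INTERVALS:
--         if start <= i < end:
--             return label
--     return "NORMAL"
--
-- def _generate_market_regimes(n_days: int):
--     return [_classify(i) for i in range(n_days)]
-- ===== Notes on version B (the rewrite author's own statement) =====
-- stated objective: simpler
-- what changed: Replaces the mutable array with five in-place painting passes by a single per-day classification against a constant interval table (one comprehension, no mutation).
import Mathlib
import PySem

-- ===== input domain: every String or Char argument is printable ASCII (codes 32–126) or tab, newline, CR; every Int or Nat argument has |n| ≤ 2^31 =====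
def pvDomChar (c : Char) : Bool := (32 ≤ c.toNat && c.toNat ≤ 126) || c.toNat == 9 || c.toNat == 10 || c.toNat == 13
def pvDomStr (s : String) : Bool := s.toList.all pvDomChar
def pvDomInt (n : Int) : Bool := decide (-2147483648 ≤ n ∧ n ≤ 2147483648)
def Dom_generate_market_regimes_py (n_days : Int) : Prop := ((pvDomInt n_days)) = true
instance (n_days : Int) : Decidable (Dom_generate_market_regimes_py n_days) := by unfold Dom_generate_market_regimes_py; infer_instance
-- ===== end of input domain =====

-- B replaces A's five in-place painting passes over a mutable array by a single
-- per-day classification against a constant interval table (objective: simpler).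

-- ===== PORT A =====
-- one Python painting loop `for i in range(a, min(b, n)): regimes[i] = lab`
def pvPaint (lab : String) (a b : Int) (l : List String) : List String :=
  (PySem.List.pyRange a b 1).foldl (fun r i => PySem.List.pySetD r i lab) l

-- same loop but with A's redundant `if i < n_days:` guard inside the body
def pvPaintG (n : Int) (lab : String) (a b : Int) (l : List String) : List String :=
  (PySem.List.pyRange a b 1).foldl
    (fun r i => if i < n then PySem.List.pySetD r i lab else r) l

-- the bull loop: `if regimes[i] == "NORMAL": regimes[i] = "BULL"`
def pvBullPaint (a b : Int) (l : List String) : List String :=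
  (PySem.List.pyRange a b 1).foldl
    (fun r i => if PySem.List.pyGetD r i "" == "NORMAL" then PySem.List.pySetD r i "BULL" else r) l

def generate_market_regimes_py (n_days : Int) : List String :=
  -- regimes = ["NORMAL"] * n_days
  -- 2000-2002 dot-com: int(2*252)=504;  2008-2009: 2016..2268;  COVID: 5040..5100;
  -- 2022: 5544..5796;  bull: int(9.5*252)=2394 .. 5040
  pvBullPaint 2394 (min 5040 n_days)
    (pvPaintG n_days "BEAR" 5544 (min 5796 n_days)
      (pvPaintG n_days "CRISIS" 5040 (min 5100 n_days)
        (pvPaintG n_days "CRISIS" 2016 (min 2268 n_days)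
          (pvPaint "BEAR" 0 (min 504 n_days)
            (List.replicate n_days.toNat "NORMAL")))))

-- ===== PORT B =====
def pvIntervals : List (Int × Int × String) :=
  [(0, 504, "BEAR"), (2016, 2268, "CRISIS"), (5040, 5100, "CRISIS"),
   (5544, 5796, "BEAR"), (2394, 5040, "BULL")]

def pvClassifyLoop (i : Int) : List (Int × Int × String) → String
  | [] => "NORMAL"
  | (s, e, lab) :: rest => if s ≤ i ∧ i < e then lab else pvClassifyLoop i rest

def pvClassify (i : Int) : String := pvClassifyLoop i pvIntervals

def generate_market_regimes_py_alt (n_days : Int) : List String :=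
  (PySem.List.pyRange 0 n_days 1).map pvClassify

-- ===== PRECONDITION & SPEC =====
def Spec_generate_market_regimes_py (n_days : Int) (out : List String) : Prop := out = generate_market_regimes_py_alt n_days
instance (n_days : Int) (out : List String) : Decidable (Spec_generate_market_regimes_py n_days out) := by unfold Spec_generate_market_regimes_py; infer_instance

-- ===== CLAIM (what is proved, stated in full; the proofs are below) =====
def Claim_equal_generate_market_regimes_py : Prop := ∀ (n_days : Int), Dom_generate_market_regimes_py n_days → Spec_generate_market_regimes_py n_days (generate_market_regimes_py n_days)

-- ===== LEMMAS AND PROOFS =====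

lemma pvPaintG_eq (n : Int) (lab : String) (a b : Int) (l : List String) (h : b ≤ n) :
    pvPaintG n lab a b l = pvPaint lab a b l := by
  unfold pvPaintG pvPaint
  apply PySem.List.foldl_congr_mem
  intro acc x hx
  have hx' := PySem.List.mem_pyRange_one.mp hx
  rw [if_pos (by omega)]

@[simp] lemma pvPaint_len (lab : String) (a b : Int) (l : List String) :
    (pvPaint lab a b l).length = l.length := by
  unfold pvPaint
  induction PySem.List.pyRange a b 1 generalizing l with
  | nil => rfl
  | cons i is ih => rw [List.foldl_cons, ih, PySem.List.length_pySetD]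

lemma pvPaint_cons (lab : String) (a b : Int) (l : List String) (h : a < b) :
    pvPaint lab a b l = pvPaint lab (a + 1) b (PySem.List.pySetD l a lab) := by
  unfold pvPaint
  rw [PySem.List.pyRange_one_cons h, List.foldl_cons]

lemma pvBull_cons (a b : Int) (l : List String) (h : a < b) :
    pvBullPaint a b l = pvBullPaint (a + 1) b
      (if PySem.List.pyGetD l a "" == "NORMAL" then PySem.List.pySetD l a "BULL" else l) := by
  unfold pvBullPaint
  rw [PySem.List.pyRange_one_cons h, List.foldl_cons]

lemma pvPaint_get (lab : String) (b : Int) : ∀ (k : Nat) (a : Int) (l : List String),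
    (b - a).toNat = k → 0 ≤ a → b ≤ (l.length : Int) → ∀ (j : Nat),
    (pvPaint lab a b l)[j]? =
      if a ≤ (j : Int) ∧ (j : Int) < b then some lab else l[j]? := by
  intro k
  induction k with
  | zero =>
    intro a l hk ha hb j
    unfold pvPaint
    rw [PySem.List.pyRange_one_eq_nil (by omega), List.foldl_nil, if_neg (by omega)]
  | succ k ih =>
    intro a l hk ha hb j
    rw [pvPaint_cons lab a b l (by omega),
        ih (a + 1) _ (by omega) (by omega) (by rw [PySem.List.length_pySetD]; exact hb) j,
        PySem.List.pySetD_of_nonneg l lab ha]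
    by_cases hja : (j : Int) = a
    · have haj : a.toNat = j := by omega
      subst haj
      have hjl : a.toNat < l.length := by omega
      rw [List.getElem?_set_self hjl, ite_self, if_pos (by omega)]
    · have hne : a.toNat ≠ j := by omega
      rw [List.getElem?_set_ne hne]
      by_cases h1 : a + 1 ≤ (j : Int) ∧ (j : Int) < b
      · rw [if_pos h1, if_pos (by omega)]
      · rw [if_neg h1, if_neg (by omega)]

lemma pvBull_get (b : Int) : ∀ (k : Nat) (a : Int) (l : List String),
    (b - a).toNat = k → 0 ≤ a → b ≤ (l.length : Int) → ∀ (j : Nat),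
    (pvBullPaint a b l)[j]? =
      if a ≤ (j : Int) ∧ (j : Int) < b ∧ l[j]? = some "NORMAL" then some "BULL" else l[j]? := by
  intro k
  induction k with
  | zero =>
    intro a l hk ha hb j
    unfold pvBullPaint
    rw [PySem.List.pyRange_one_eq_nil (by omega), List.foldl_nil,
        if_neg (by rintro ⟨h1, h2, h3⟩; omega)]
  | succ k ih =>
    intro a l hk ha hb j
    have hal : a.toNat < l.length := by omega
    have hget : PySem.List.pyGetD l a "" = l[a.toNat] :=
      PySem.List.pyGetD_eq_getElem l "" ha (by omega)
    have hopt : l[a.toNat]? = some (PySem.List.pyGetD l a "") := by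
      rw [hget, List.getElem?_eq_getElem hal]
    rw [pvBull_cons a b l (by omega)]
    by_cases hN : PySem.List.pyGetD l a "" = "NORMAL"
    · rw [if_pos (beq_iff_eq.mpr hN), PySem.List.pySetD_of_nonneg l "BULL" ha,
          ih (a + 1) _ (by omega) (by omega) (by rw [List.length_set]; exact hb) j]
      by_cases hja : (j : Int) = a
      · have haj : a.toNat = j := by omega
        subst haj
        rw [List.getElem?_set_self hal, ite_self,
            if_pos ⟨by omega, by omega, by rw [hopt, hN]⟩]
      · have hne : a.toNat ≠ j := by omega
        rw [List.getElem?_set_ne hne]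
        by_cases h1 : a + 1 ≤ (j : Int) ∧ (j : Int) < b ∧ l[j]? = some "NORMAL"
        · rw [if_pos h1, if_pos ⟨by omega, h1.2.1, h1.2.2⟩]
        · rw [if_neg h1, if_neg (by rintro ⟨h2, h3, h4⟩; exact h1 ⟨by omega, h3, h4⟩)]
    · rw [if_neg (by simp [hN]), ih (a + 1) l (by omega) (by omega) hb j]
      by_cases hja : (j : Int) = a
      · have haj : a.toNat = j := by omega
        have hlj : l[j]? ≠ some "NORMAL" := by rw [← haj, hopt]; simp [hN]
        rw [if_neg (by rintro ⟨h1, h2, h3⟩; omega),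
            if_neg (by rintro ⟨h1, h2, h3⟩; exact hlj h3)]
      · by_cases h1 : a + 1 ≤ (j : Int) ∧ (j : Int) < b ∧ l[j]? = some "NORMAL"
        · rw [if_pos h1, if_pos ⟨by omega, h1.2.1, h1.2.2⟩]
        · rw [if_neg h1, if_neg (by rintro ⟨h2, h3, h4⟩; exact h1 ⟨by omega, h3, h4⟩)]

-- ===== VERDICT (by name: the statement is the Claim_ definition above) =====
set_option maxHeartbeats 1000000 in
theorem generate_market_regimes_py_spec : Claim_equal_generate_market_regimes_py := by
  intro n _hd
  unfold Spec_generate_market_regimes_py generate_market_regimes_py generate_market_regimes_py_alt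
  apply List.ext_getElem?
  intro j
  rw [pvPaintG_eq n "CRISIS" 2016 (min 2268 n) _ (by omega),
      pvPaintG_eq n "CRISIS" 5040 (min 5100 n) _ (by omega),
      pvPaintG_eq n "BEAR" 5544 (min 5796 n) _ (by omega)]
  rw [pvBull_get (min 5040 n) _ 2394 _ rfl (by omega) (by simp only [pvPaint_len, List.length_replicate]; omega) j]
  rw [pvPaint_get "BEAR" (min 5796 n) _ 5544 _ rfl (by omega) (by simp only [pvPaint_len, List.length_replicate]; omega) j]
  rw [pvPaint_get "CRISIS" (min 5100 n) _ 5040 _ rfl (by omega) (by simp only [pvPaint_len, List.length_replicate]; omega) j]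
  rw [pvPaint_get "CRISIS" (min 2268 n) _ 2016 _ rfl (by omega) (by simp only [pvPaint_len, List.length_replicate]; omega) j]
  rw [pvPaint_get "BEAR" (min 504 n) _ 0 _ rfl (by omega) (by simp only [List.length_replicate]; omega) j]
  rw [List.getElem?_replicate, List.getElem?_map, PySem.List.getElem?_pyRange_one]
  by_cases hj : j < (n - 0).toNat
  · rw [if_pos hj]
    simp only [Option.map_some, pvClassify, pvClassifyLoop, pvIntervals, zero_add]
    split_ifs <;> simp_all <;> omega
  · rw [if_neg hj]
    simp only [Option.map_none]
    split_ifs <;> simp_all <;> omega
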